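-- pv_equiv track=rewrite | github.com/ATPs/xiaolongTools | WenlinTools.Python3/python_lib/Bong/evdblib/Utils/Parsers/PDBMappingTools.py | get_difference_indices
-- ===== SOURCE A (Python) =====
-- def get_difference_indices( seq1, seq2 ) :
-- 	'''
-- 	returns the indices of the resdiues available
-- 	in seq1 but not in seq2.
-- 	Note that seq1 and seq2 should be pre-aligned.
-- 	'''
-- 	indices = []
-- 	i = -1
-- 	for a, b in zip( seq1, seq2 ) :
-- 		if a.isalpha() :
-- 			i += 1
--
-- 		if a.isalpha() and not b.isalpha() :
-- 			indices.append( i )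
--
-- 	return indices
-- ===== SOURCE B (Python) =====
-- def get_difference_indices(seq1, seq2):
--     '''
--     returns the indices of the resdiues available
--     in seq1 but not in seq2.
--     Note that seq1 and seq2 should be pre-aligned.
--     '''
--     def solve(pairs):
--         # returns (indices relative to this segment, number of alpha seq1 chars in it)
--         if len(pairs) <= 1:
--             if pairs and pairs[0][0].isalpha():
--                 return ([0] if not pairs[0][1].isalpha() else []), 1
--             return [], 0
--         mid = len(pairs) // 2
--         li, lc = solve(pairs[:mid])
--         ri, rc = solve(pairs[mid:])
--         return li + [j + lc for j in ri], lc + rc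
--     return solve(list(zip(seq1, seq2)))[0]
-- ===== Notes on version B (the rewrite author's own statement) =====
-- stated objective: alternative
-- what changed: Replaces the single left-to-right loop with a running index by a divide-and-conquer recursion: each half returns its local 0-based indices plus its alpha count, and the right half's indices are shifted by the left half's alpha count when merging.
import Mathlib
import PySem

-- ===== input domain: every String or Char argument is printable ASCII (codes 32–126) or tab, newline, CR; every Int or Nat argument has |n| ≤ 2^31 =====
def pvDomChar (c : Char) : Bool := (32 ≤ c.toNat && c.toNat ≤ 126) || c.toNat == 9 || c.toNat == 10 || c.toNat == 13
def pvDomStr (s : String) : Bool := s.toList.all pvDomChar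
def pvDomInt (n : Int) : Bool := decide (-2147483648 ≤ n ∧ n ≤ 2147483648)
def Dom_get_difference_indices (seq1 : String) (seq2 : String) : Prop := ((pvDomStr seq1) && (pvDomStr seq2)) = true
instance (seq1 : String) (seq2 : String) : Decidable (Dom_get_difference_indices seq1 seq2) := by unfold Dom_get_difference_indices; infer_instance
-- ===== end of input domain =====

-- B computes the same indices by divide and conquer (each half returns local indices + its
-- alpha count, merged by shifting) instead of A's single loop with a running index.

-- ===== PORT A =====
-- single loop over zip(seq1, seq2) with a running index i and an accumulator, as in A
def get_difference_indices (seq1 : String) (seq2 : String) : List Int :=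
  ((seq1.toList.zip seq2.toList).foldl
    (fun (st : List Int × Int) ab =>
      let i := if PySem.Chars.isalpha ab.1 then st.2 + 1 else st.2
      let indices := if PySem.Chars.isalpha ab.1 && !PySem.Chars.isalpha ab.2
                     then st.1 ++ [i] else st.1
      (indices, i))
    ([], -1)).1

-- ===== PORT B =====
-- divide and conquer: solve returns (segment-local 0-based indices, alpha count of segment)
def pvSolve : List (Char × Char) → List Int × Int
  | [] => ([], 0)
  | [(a, b)] =>
    if PySem.Chars.isalpha a then
      ((if !PySem.Chars.isalpha b then [(0 : Int)] else []), 1)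
    else ([], 0)
  | z1 :: z2 :: t =>
    let zs := z1 :: z2 :: t
    let mid := zs.length / 2
    let l := pvSolve (zs.take mid)
    let r := pvSolve (zs.drop mid)
    (l.1 ++ r.1.map (· + l.2), l.2 + r.2)
termination_by zs => zs.length
decreasing_by
  · simp [List.length_take]; omega
  · simp; omega

def get_difference_indices_alt (seq1 : String) (seq2 : String) : List Int :=
  (pvSolve (seq1.toList.zip seq2.toList)).1

-- ===== PRECONDITION & SPEC =====
def Spec_get_difference_indices (seq1 : String) (seq2 : String) (out : List Int) : Prop := out = get_difference_indices_alt seq1 seq2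
instance (seq1 : String) (seq2 : String) (out : List Int) : Decidable (Spec_get_difference_indices seq1 seq2 out) := by unfold Spec_get_difference_indices; infer_instance

-- ===== CLAIM (what is proved, stated in full; the proofs are below) =====
def Claim_equal_get_difference_indices : Prop := ∀ (seq1 : String) (seq2 : String), Dom_get_difference_indices seq1 seq2 → Spec_get_difference_indices seq1 seq2 (get_difference_indices seq1 seq2)

-- ===== LEMMAS AND PROOFS =====

-- characterisation of A's loop: indices emitted over the zipped list starting with counter i
def pvCore (zs : List (Char × Char)) (i : Int) : List Int :=
  match zs with
  | [] => []
  | (a, b) :: t =>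
    if PySem.Chars.isalpha a then
      (if !PySem.Chars.isalpha b then [i + 1] else []) ++ pvCore t (i + 1)
    else pvCore t i

def pvCount (zs : List (Char × Char)) : Int :=
  (zs.countP (fun ab => PySem.Chars.isalpha ab.1) : Int)

theorem pvCore_foldl (zs : List (Char × Char)) (acc : List Int) (i : Int) :
    (zs.foldl
      (fun (st : List Int × Int) ab =>
        let j := if PySem.Chars.isalpha ab.1 then st.2 + 1 else st.2
        let indices := if PySem.Chars.isalpha ab.1 && !PySem.Chars.isalpha ab.2
                       then st.1 ++ [j] else st.1
        (indices, j))
      (acc, i)).1 = acc ++ pvCore zs i := by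
  induction zs generalizing acc i with
  | nil => simp [pvCore]
  | cons hd t ih =>
    obtain ⟨a, b⟩ := hd
    rw [List.foldl_cons]
    refine Eq.trans (ih _ _) ?_
    by_cases ha : PySem.Chars.isalpha a <;> by_cases hb : PySem.Chars.isalpha b <;>
      simp [pvCore, ha, hb]

theorem pvCore_shift (zs : List (Char × Char)) (i : Int) :
    pvCore zs i = (pvCore zs (-1)).map (· + (i + 1)) := by
  induction zs generalizing i with
  | nil => simp [pvCore]
  | cons hd t ih =>
    obtain ⟨a, b⟩ := hd
    by_cases ha : PySem.Chars.isalpha a <;> by_cases hb : PySem.Chars.isalpha b <;>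
        simp [pvCore, ha, hb, ih (i + 1), ih 0, List.map_map] <;>
      first
        | (exact ih i)
        | (intro x hx; ring)

theorem pvCore_append (xs ys : List (Char × Char)) (i : Int) :
    pvCore (xs ++ ys) i = pvCore xs i ++ pvCore ys (i + pvCount xs) := by
  induction xs generalizing i with
  | nil => simp [pvCore, pvCount]
  | cons hd t ih =>
    obtain ⟨a, b⟩ := hd
    by_cases ha : PySem.Chars.isalpha a
    · simp [pvCore, ha, ih, pvCount]
      congr 1; ring
    · simp [pvCore, ha, ih, pvCount]

theorem pvCount_append (xs ys : List (Char × Char)) :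
    pvCount (xs ++ ys) = pvCount xs + pvCount ys := by
  simp [pvCount, List.countP_append]

theorem pvSolve_eq (zs : List (Char × Char)) :
    pvSolve zs = (pvCore zs (-1), pvCount zs) := by
  have H : ∀ (n : ℕ) (zs : List (Char × Char)), zs.length = n →
      pvSolve zs = (pvCore zs (-1), pvCount zs) := by
    intro n
    induction n using Nat.strong_induction_on with
    | _ n ih =>
      intro zs hlen
      match zs with
      | [] => simp [pvSolve, pvCore, pvCount]
      | [(a, b)] =>
        by_cases ha : PySem.Chars.isalpha a <;> by_cases hb : PySem.Chars.isalpha b <;>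
          simp [pvSolve, pvCore, pvCount, ha, hb]
      | z1 :: z2 :: t =>
        have hlen2 : (z1 :: z2 :: t).length = t.length + 2 := by simp
        have hmidlt : (z1 :: z2 :: t).length / 2 < (z1 :: z2 :: t).length := by omega
        have hmidpos : 0 < (z1 :: z2 :: t).length / 2 := by omega
        rw [pvSolve]
        rw [ih (((z1 :: z2 :: t).take ((z1 :: z2 :: t).length / 2)).length)
              (by rw [← hlen]; simp [List.length_take]; omega) _ rfl,
            ih (((z1 :: z2 :: t).drop ((z1 :: z2 :: t).length / 2)).length)
              (by rw [← hlen]; simp; omega) _ rfl]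
        have hsplit : (z1 :: z2 :: t) =
            ((z1 :: z2 :: t).take ((z1 :: z2 :: t).length / 2)) ++
            ((z1 :: z2 :: t).drop ((z1 :: z2 :: t).length / 2)) := by
          rw [List.take_append_drop]
        dsimp only
        rw [Prod.mk.injEq]
        constructor
        · conv_rhs => rw [hsplit]
          rw [pvCore_append]
          have hsh : (-1 : Int) + pvCount (List.take ((z1 :: z2 :: t).length / 2) (z1 :: z2 :: t)) + 1
              = pvCount (List.take ((z1 :: z2 :: t).length / 2) (z1 :: z2 :: t)) := by ring
          rw [pvCore_shift (List.drop ((z1 :: z2 :: t).length / 2) (z1 :: z2 :: t))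
                ((-1) + pvCount (List.take ((z1 :: z2 :: t).length / 2) (z1 :: z2 :: t))), hsh]
        · conv_rhs => rw [hsplit]
          rw [pvCount_append]
  exact H zs.length zs rfl

-- ===== VERDICT (by name: the statement is the Claim_ definition above) =====
theorem get_difference_indices_spec : Claim_equal_get_difference_indices := by
  intro seq1 seq2 _
  unfold Spec_get_difference_indices get_difference_indices get_difference_indices_alt
  rw [pvCore_foldl, pvSolve_eq]
  simp
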